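-- pv_equiv track=rewrite | github.com/drakempham/Technical | algorithm + contest/pattern/bfs.py | colorGrid
-- ===== SOURCE A (Python) =====
-- from collections import deque
-- from typing import List
--
-- def colorGrid(m: int, n: int, sources: List[List[int]]) -> List[List[int]]:
--     ans = [([0] * (n)) for _ in range(m)]
--     queue = deque()
--     sources.sort(key=lambda x: -x[2])
--     for r, c, color in sources:
--         ans[r][c] = color
--         queue.append((r, c, color))
--     directions = [[-1, 0], [0, -1], [1, 0], [0, 1]]
--
--     while queue:
--         curr_r, curr_c, curr_color = queue.popleft()
--         for r, c in directions:
--             new_r = curr_r + r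
--             new_c = curr_c + c
--             if 0 <= new_r < m and 0 <= new_c < n and ans[new_r][new_c] == 0:
--                 ans[new_r][new_c] = curr_color
--                 queue.append((new_r, new_c, curr_color))
--     return ans
-- ===== SOURCE B (Python) =====
-- def colorGrid(m, n, sources):
--     # Per-cell nearest-source (Manhattan) Voronoi coloring; no BFS queue.
--     # Note: like the original, this sorts `sources` in place (observable mutation).
--     sources.sort(key=lambda x: -x[2])
--     seeded = {}
--     for r, c, color in sources:
--         seeded[(r, c)] = color
--
--     def cell(i, j):
--         if (i, j) in seeded:
--             return seeded[(i, j)]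
--         best = None
--         for r, c, color in sources:
--             d = abs(r - i) + abs(c - j)
--             if best is None or d < best[0]:
--                 best = (d, color)
--         return best[1] if best is not None else 0
--
--     return [[cell(i, j) for j in range(n)] for i in range(m)]
-- ===== Notes on version B (the rewrite author's own statement) =====
-- stated objective: alternative
-- what changed: The multi-source BFS flood fill with a deque and in-place grid mutation is replaced by a direct per-cell computation: after the same descending sort, each non-source cell is assigned the color of the nearest source by Manhattan distance (ties broken by earliest position in the sorted list), with source cells taken from a last-writer seed dict; no queue or frontier exists.
-- outside the precondition, e.g. on colorGrid(1, 3, [[0, 0, 1], [0, -1, 2]]): A returns [[1, 1, 2]], B returns [[1, 1, 1]]; on colorGrid(1, 2, [[0, 0, 0], [0, 1, 1]]): A returns [[1, 1]], B returns [[0, 1]]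
import Mathlib
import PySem

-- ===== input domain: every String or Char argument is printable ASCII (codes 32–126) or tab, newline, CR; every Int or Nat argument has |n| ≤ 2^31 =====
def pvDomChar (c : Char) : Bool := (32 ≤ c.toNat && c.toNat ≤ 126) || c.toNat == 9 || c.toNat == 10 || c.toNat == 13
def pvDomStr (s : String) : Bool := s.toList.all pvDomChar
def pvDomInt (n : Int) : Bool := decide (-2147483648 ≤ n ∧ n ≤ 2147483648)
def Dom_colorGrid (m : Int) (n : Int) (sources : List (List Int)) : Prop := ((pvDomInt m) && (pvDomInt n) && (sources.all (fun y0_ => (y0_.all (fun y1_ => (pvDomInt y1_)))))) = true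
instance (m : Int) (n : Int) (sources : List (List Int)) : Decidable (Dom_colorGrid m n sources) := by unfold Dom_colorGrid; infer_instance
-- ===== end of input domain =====

-- B replaces the multi-source BFS flood fill (deque + in-place grid) by a per-cell nearest-source
-- (Manhattan) Voronoi computation over the same sorted source list; equivalence is about the return
-- value (both versions sort `sources` in place).


-- ===== PORT A =====
-- ans[r][c] = v  (exact Python semantics for the in-range indices Pre_ guarantees)
def pvSetCell (g : List (List Int)) (r c v : Int) : List (List Int) :=
  PySem.List.pySetD g r (PySem.List.pySetD (PySem.List.pyGetD g r []) c v)

-- ans[r][c]  (read; default 0 is never consulted on the in-range reads A performs)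
def pvCell (g : List (List Int)) (r c : Int) : Int :=
  PySem.List.pyGetD (PySem.List.pyGetD g r []) c 0

-- the body of one pop: for r, c in directions: ... (returns the updated grid and the appended entries)
def pvExpand (m n : Int) (g : List (List Int)) (e : Int × Int × Int) :
    List (List Int) × List (Int × Int × Int) :=
  [((-1 : Int), (0 : Int)), (0, -1), (1, 0), (0, 1)].foldl
    (fun st d =>
      let nr := e.1 + d.1
      let nc := e.2.1 + d.2
      if 0 ≤ nr ∧ nr < m ∧ 0 ≤ nc ∧ nc < n ∧ pvCell st.1 nr nc = 0 then
        (pvSetCell st.1 nr nc e.2.2, st.2 ++ [(nr, nc, e.2.2)])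
      else st)
    (g, [])

-- while queue: popleft, expand, extend.  The fuel only bounds the number of pops: inside
-- Pre_ every pop strictly decreases (zero cells + queue length), so the fuel chosen in
-- colorGrid is never exhausted there and the loop runs exactly as in Python.
def pvBFS (m n : Int) : Nat → List (List Int) → List (Int × Int × Int) → List (List Int)
  | _, g, [] => g
  | 0, g, _ :: _ => g
  | f + 1, g, e :: rest =>
    let p := pvExpand m n g e
    pvBFS m n f p.1 (rest ++ p.2)

def colorGrid (m : Int) (n : Int) (sources : List (List Int)) : List (List Int) :=
  -- ans = [[0] * n for _ in range(m)]
  let ans0 := (PySem.List.pyRange 0 m 1).map (fun _ => PySem.List.pyRepeat [(0 : Int)] n)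
  -- sources.sort(key=lambda x: -x[2])   (x[2] ported with default 0: rows shorter than 3 raise in Python, outside Pre_)
  let ss := PySem.List.sorted sources (fun x => -(PySem.List.pyGetD x 2 0)) false
  -- for r, c, color in sources: ans[r][c] = color; queue.append((r, c, color))
  let st := ss.foldl
    (fun (st : List (List Int) × List (Int × Int × Int)) s =>
      let r := PySem.List.pyGetD s 0 0
      let c := PySem.List.pyGetD s 1 0
      let col := PySem.List.pyGetD s 2 0
      (pvSetCell st.1 r c col, st.2 ++ [(r, c, col)]))
    (ans0, [])
  pvBFS m n (sources.length + m.toNat * n.toNat) st.1 st.2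

-- ===== PORT B =====
-- the inner scan: running (best distance, its color), first strict improvement wins
def pvNearestB (ss : List (List Int)) (i j : Int) : Option (Int × Int) :=
  ss.foldl
    (fun best s =>
      let r := PySem.List.pyGetD s 0 0
      let c := PySem.List.pyGetD s 1 0
      let color := PySem.List.pyGetD s 2 0
      let d := |r - i| + |c - j|
      match best with
      | none => some (d, color)
      | some b => if d < b.1 then some (d, color) else some b)
    none

def colorGrid_alt (m : Int) (n : Int) (sources : List (List Int)) : List (List Int) :=
  -- sources.sort(key=lambda x: -x[2])
  let ss := PySem.List.sorted sources (fun x => -(PySem.List.pyGetD x 2 0)) false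
  -- seeded = {}; for r, c, color in sources: seeded[(r, c)] = color
  let seeded := ss.foldl
    (fun (d : PySem.Dict (Int × Int) Int) s =>
      d.insert (PySem.List.pyGetD s 0 0, PySem.List.pyGetD s 1 0) (PySem.List.pyGetD s 2 0))
    PySem.Dict.empty
  -- [[cell(i, j) for j in range(n)] for i in range(m)]
  (PySem.List.pyRange 0 m 1).map (fun i =>
    (PySem.List.pyRange 0 n 1).map (fun j =>
      match PySem.Dict.get? seeded (i, j) with
      | some col => col
      | none =>
        match pvNearestB ss i j with
        | some b => b.2
        | none => 0))

-- ===== PRECONDITION & SPEC =====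
-- Pre_ restricts to the natural domain of the task: every source is a [row, col, color] triple
-- addressing a cell of the grid.  Excluded even though A may still return there: rows of other
-- lengths (unpacking raises ValueError, short rows also make the sort key raise IndexError);
-- out-of-range coordinates (IndexError, or Python's negative-index wraparound, which is outside
-- the natural domain); and zero-color sources, on which A's BFS keeps re-enqueueing zero-valued
-- cells and loops forever on most grids.
def Pre_colorGrid (m : Int) (n : Int) (sources : List (List Int)) : Prop :=
  ∀ s ∈ sources, s.length = 3 ∧
    0 ≤ PySem.List.pyGetD s 0 0 ∧ PySem.List.pyGetD s 0 0 < m ∧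
    0 ≤ PySem.List.pyGetD s 1 0 ∧ PySem.List.pyGetD s 1 0 < n ∧
    PySem.List.pyGetD s 2 0 ≠ 0

instance (m : Int) (n : Int) (sources : List (List Int)) : Decidable (Pre_colorGrid m n sources) := by
  unfold Pre_colorGrid; infer_instance

def pvWitness_colorGrid : Int × Int × List (List Int) := (2, 3, [[0, 0, 5], [1, 2, 3]])

def Spec_colorGrid (m : Int) (n : Int) (sources : List (List Int)) (out : List (List Int)) : Prop := out = colorGrid_alt m n sources
instance (m : Int) (n : Int) (sources : List (List Int)) (out : List (List Int)) : Decidable (Spec_colorGrid m n sources out) := by unfold Spec_colorGrid; infer_instance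

-- ===== CLAIM (what is proved, stated in full; the proofs are below) =====
def Claim_equal_colorGrid : Prop := ∀ (m : Int) (n : Int) (sources : List (List Int)), Dom_colorGrid m n sources → Pre_colorGrid m n sources → Spec_colorGrid m n sources (colorGrid m n sources)

-- ===== LEMMAS AND PROOFS =====

-- ---------- basic objects ----------

-- Manhattan distance from a source entry (r, c, color) to a cell
def pvDE (e : Int × Int × Int) (v : Int × Int) : Int := |e.1 - v.1| + |e.2.1 - v.2|

def pvInR (m n : Int) (v : Int × Int) : Prop := 0 ≤ v.1 ∧ v.1 < m ∧ 0 ≤ v.2 ∧ v.2 < n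

def pvOK (m n : Int) (e : Int × Int × Int) : Prop :=
  0 ≤ e.1 ∧ e.1 < m ∧ 0 ≤ e.2.1 ∧ e.2.1 < n ∧ e.2.2 ≠ 0

def pvTriple (s : List Int) : Int × Int × Int :=
  (PySem.List.pyGetD s 0 0, PySem.List.pyGetD s 1 0, PySem.List.pyGetD s 2 0)

-- first-minimum scan: (index, distance, color) of the first source at minimal distance
def pvBest : List (Int × Int × Int) → (Int × Int) → Option (Nat × Int × Int)
  | [], _ => none
  | e :: L, v =>
    match pvBest L v with
    | some (k, d, c) => if d < pvDE e v then some (k + 1, d, c) else some (0, pvDE e v, e.2.2)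
    | none => some (0, pvDE e v, e.2.2)

-- color of the LAST source listed at cell v (Python dict overwrite / in-place seed overwrite)
def pvSeedVal (L : List (Int × Int × Int)) (v : Int × Int) : Option Int :=
  (L.reverse.find? (fun e => e.1 == v.1 && e.2.1 == v.2)).map (fun e => e.2.2)

def pvSpecCell (L : List (Int × Int × Int)) (v : Int × Int) : Int :=
  match pvSeedVal L v with
  | some c => c
  | none => match pvBest L v with
            | some x => x.2.2
            | none => 0

def pvCv (g : List (List Int)) (v : Int × Int) : Int := pvCell g v.1 v.2

def pvShape (m n : Int) (g : List (List Int)) : Prop :=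
  g.length = m.toNat ∧ ∀ row ∈ g, row.length = n.toNat

def pvZ (g : List (List Int)) : Nat := (g.map (fun row => row.countP (fun x => x == 0))).sum

-- named copies of the port's loop bodies (definitionally equal, used to state fold lemmas)
def pvStepE (m n : Int) (e : Int × Int × Int)
    (st : List (List Int) × List (Int × Int × Int)) (d : Int × Int) :
    List (List Int) × List (Int × Int × Int) :=
  let nr := e.1 + d.1
  let nc := e.2.1 + d.2
  if 0 ≤ nr ∧ nr < m ∧ 0 ≤ nc ∧ nc < n ∧ pvCell st.1 nr nc = 0 then
    (pvSetCell st.1 nr nc e.2.2, st.2 ++ [(nr, nc, e.2.2)])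
  else st

def pvPL (m n : Int) (g : List (List Int)) (q : List (Int × Int × Int)) :
    List (List Int) × List (Int × Int × Int) :=
  q.foldl (fun st e => ((pvExpand m n st.1 e).1, st.2 ++ (pvExpand m n st.1 e).2)) (g, [])

-- annotation of a queue with positions (proof-side only)
def pvAnn : List (Int × Int × Int) → Nat → List ((Int × Int × Int) × Nat)
  | [], _ => []
  | e :: L, k => (e, k) :: pvAnn L (k + 1)

-- the BFS invariant, parameterised by the processed state:
--   t:   current wave distance;  h: current grid;
--   New: cells claimed this round (annotated with the index of their claiming source);
--   Q2:  the not-yet-processed part of this round's queue.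
structure pvInv (m n : Int) (L : List (Int × Int × Int)) (t : Nat) (h : List (List Int))
    (New Q2 : List ((Int × Int × Int) × Nat)) : Prop where
  shape : pvShape m n h
  seedv : ∀ v, pvInR m n v → pvSeedVal L v ≠ none → pvCv h v = (pvSeedVal L v).getD 0
  settled : ∀ v k d c, pvInR m n v → pvSeedVal L v = none → pvBest L v = some (k, d, c) →
    d ≤ (t : Int) → pvCv h v = c
  claimedv : ∀ v k c, pvInR m n v → pvBest L v = some (k, (t : Int) + 1, c) →
    (∃ p ∈ New, (p.1.1, p.1.2.1) = v) → pvCv h v = c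
  unclaimed : ∀ v k c, pvInR m n v → pvBest L v = some (k, (t : Int) + 1, c) →
    (∀ p ∈ New, (p.1.1, p.1.2.1) ≠ v) → pvCv h v = 0
  far : ∀ v k d c, pvInR m n v → pvBest L v = some (k, d, c) → (t : Int) + 1 < d → pvCv h v = 0
  nosrc : ∀ v, pvInR m n v → pvBest L v = none → pvCv h v = 0
  newok : ∀ p ∈ New, pvInR m n (p.1.1, p.1.2.1) ∧
    pvBest L (p.1.1, p.1.2.1) = some (p.2, (t : Int) + 1, p.1.2.2)
  newmono : (New.map Prod.snd).Pairwise (· ≤ ·)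
  newq : ∀ p ∈ New, ∀ q ∈ Q2, p.2 ≤ q.2
  qmono : (Q2.map Prod.snd).Pairwise (· ≤ ·)
  qok : ∀ p ∈ Q2, ∃ hh : p.2 < L.length, pvDE L[p.2] (p.1.1, p.1.2.1) = (t : Int) ∧
    L[p.2].2.2 = p.1.2.2 ∧ pvInR m n (p.1.1, p.1.2.1)
  reach : ∀ v k c, pvInR m n v → pvBest L v = some (k, (t : Int) + 1, c) → pvCv h v = 0 →
    ∃ p ∈ Q2, p.2 = k ∧ |p.1.1 - v.1| + |p.1.2.1 - v.2| = 1

-- ---------- arithmetic helpers ----------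

lemma pvAbs (x : Int) : (0 ≤ x ∧ |x| = x) ∨ (x < 0 ∧ |x| = -x) := by
  by_cases h : 0 ≤ x
  · exact Or.inl ⟨h, abs_of_nonneg h⟩
  · have h' : x < 0 := by omega
    exact Or.inr ⟨h', abs_of_neg h'⟩

lemma pvDE_nonneg (e : Int × Int × Int) (v : Int × Int) : 0 ≤ pvDE e v := by
  unfold pvDE
  have h1 := abs_nonneg (e.1 - v.1)
  have h2 := abs_nonneg (e.2.1 - v.2)
  omega

lemma pvDE_zero_iff (e : Int × Int × Int) (v : Int × Int) :
    pvDE e v = 0 ↔ e.1 = v.1 ∧ e.2.1 = v.2 := by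
  unfold pvDE
  rcases pvAbs (e.1 - v.1) with ⟨h1, e1⟩ | ⟨h1, e1⟩ <;>
    rcases pvAbs (e.2.1 - v.2) with ⟨h2, e2⟩ | ⟨h2, e2⟩ <;>
      rw [e1, e2] <;> omega

lemma pvDE_adj (e : Int × Int × Int) (u v : Int × Int)
    (h : |u.1 - v.1| + |u.2 - v.2| = 1) : pvDE e v ≤ pvDE e u + 1 ∧ pvDE e u ≤ pvDE e v + 1 := by
  unfold pvDE
  rcases pvAbs (u.1 - v.1) with ⟨h1, e1⟩ | ⟨h1, e1⟩ <;>
    rcases pvAbs (u.2 - v.2) with ⟨h2, e2⟩ | ⟨h2, e2⟩ <;>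
      rcases pvAbs (e.1 - v.1) with ⟨h3, e3⟩ | ⟨h3, e3⟩ <;>
        rcases pvAbs (e.2.1 - v.2) with ⟨h4, e4⟩ | ⟨h4, e4⟩ <;>
          rcases pvAbs (e.1 - u.1) with ⟨h5, e5⟩ | ⟨h5, e5⟩ <;>
            rcases pvAbs (e.2.1 - u.2) with ⟨h6, e6⟩ | ⟨h6, e6⟩ <;>
              rw [e1, e2] at h <;> rw [e3, e4, e5, e6] <;> omega

lemma pvAdj_mem (u v : Int × Int) (h : |u.1 - v.1| + |u.2 - v.2| = 1) :
    v = (u.1 + -1, u.2 + 0) ∨ v = (u.1 + 0, u.2 + -1) ∨ v = (u.1 + 1, u.2 + 0) ∨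
    v = (u.1 + 0, u.2 + 1) := by
  rcases u with ⟨u1, u2⟩
  rcases v with ⟨v1, v2⟩
  simp only [Prod.mk.injEq]
  simp only at h
  rcases pvAbs (u1 - v1) with ⟨h1, e1⟩ | ⟨h1, e1⟩ <;>
    rcases pvAbs (u2 - v2) with ⟨h2, e2⟩ | ⟨h2, e2⟩ <;> rw [e1, e2] at h <;> omega

-- ---------- pvBest ----------

lemma pvBest_cons (e : Int × Int × Int) (L : List (Int × Int × Int)) (v : Int × Int) :
    pvBest (e :: L) v =
      match pvBest L v with
      | some x => if x.2.1 < pvDE e v then some (x.1 + 1, x.2.1, x.2.2)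
                  else some (0, pvDE e v, e.2.2)
      | none => some (0, pvDE e v, e.2.2) := by
  simp only [pvBest]
  cases h : pvBest L v with
  | none => rfl
  | some x => rcases x with ⟨k, d, c⟩; rfl

lemma pvBest_eq_none_iff (L : List (Int × Int × Int)) (v : Int × Int) :
    pvBest L v = none ↔ L = [] := by
  cases L with
  | nil => simp [pvBest]
  | cons e L =>
    rw [pvBest_cons]
    cases h : pvBest L v with
    | none => simp
    | some x => by_cases hlt : x.2.1 < pvDE e v <;> simp [hlt]

lemma pvBest_lb (L : List (Int × Int × Int)) (v : Int × Int) (k : Nat) (d c : Int)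
    (h : pvBest L v = some (k, d, c)) : ∀ e ∈ L, d ≤ pvDE e v := by
  induction L generalizing k d c with
  | nil => simp [pvBest] at h
  | cons e0 L ih =>
    rw [pvBest_cons] at h
    cases hrec : pvBest L v with
    | none =>
      rw [hrec] at h
      dsimp only at h
      have hL : L = [] := (pvBest_eq_none_iff L v).mp hrec
      subst hL
      simp only [Option.some.injEq, Prod.mk.injEq] at h
      intro e he
      simp only [List.mem_cons, List.not_mem_nil, or_false] at he
      subst he
      omega
    | some x =>
      rcases x with ⟨k0, d0, c0⟩
      rw [hrec] at h
      dsimp only at h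
      by_cases hlt : d0 < pvDE e0 v
      · rw [if_pos hlt] at h
        simp only [Option.some.injEq, Prod.mk.injEq] at h
        obtain ⟨hk, hd, hc⟩ := h
        intro e he
        rcases List.mem_cons.mp he with he | he
        · subst he; omega
        · have := ih k0 d0 c0 hrec e he
          omega
      · rw [if_neg hlt] at h
        simp only [Option.some.injEq, Prod.mk.injEq] at h
        obtain ⟨hk, hd, hc⟩ := h
        intro e he
        rcases List.mem_cons.mp he with he | he
        · subst he; omega
        · have := ih k0 d0 c0 hrec e he
          omega

lemma pvBest_attain (L : List (Int × Int × Int)) (v : Int × Int) (k : Nat) (d c : Int)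
    (h : pvBest L v = some (k, d, c)) : ∃ hk : k < L.length, pvDE L[k] v = d ∧ L[k].2.2 = c := by
  induction L generalizing k d c with
  | nil => simp [pvBest] at h
  | cons e0 L ih =>
    rw [pvBest_cons] at h
    cases hrec : pvBest L v with
    | none =>
      rw [hrec] at h
      dsimp only at h
      simp only [Option.some.injEq, Prod.mk.injEq] at h
      obtain ⟨hk, hd, hc⟩ := h
      subst hk
      exact ⟨by simp, by simpa using ⟨hd, hc⟩⟩
    | some x =>
      rcases x with ⟨k0, d0, c0⟩
      rw [hrec] at h
      dsimp only at h
      by_cases hlt : d0 < pvDE e0 v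
      · rw [if_pos hlt] at h
        simp only [Option.some.injEq, Prod.mk.injEq] at h
        obtain ⟨hk, hd, hc⟩ := h
        subst hk hd hc
        obtain ⟨hk0, h1, h2⟩ := ih k0 d0 c0 hrec
        exact ⟨by simpa using Nat.succ_lt_succ hk0, by simpa using ⟨h1, h2⟩⟩
      · rw [if_neg hlt] at h
        simp only [Option.some.injEq, Prod.mk.injEq] at h
        obtain ⟨hk, hd, hc⟩ := h
        subst hk
        exact ⟨by simp, by simpa using ⟨hd, hc⟩⟩

lemma pvBest_first (L : List (Int × Int × Int)) (v : Int × Int) (k : Nat) (d c : Int)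
    (h : pvBest L v = some (k, d, c)) :
    ∀ k', (hk : k' < L.length) → k' < k → d < pvDE L[k'] v := by
  induction L generalizing k d c with
  | nil => simp [pvBest] at h
  | cons e0 L ih =>
    rw [pvBest_cons] at h
    cases hrec : pvBest L v with
    | none =>
      rw [hrec] at h
      dsimp only at h
      simp only [Option.some.injEq, Prod.mk.injEq] at h
      obtain ⟨hk, hd, hc⟩ := h
      subst hk
      omega
    | some x =>
      rcases x with ⟨k0, d0, c0⟩
      rw [hrec] at h
      dsimp only at h
      by_cases hlt : d0 < pvDE e0 v
      · rw [if_pos hlt] at h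
        simp only [Option.some.injEq, Prod.mk.injEq] at h
        obtain ⟨hk, hd, hc⟩ := h
        subst hk hd hc
        intro k' hk' hlt'
        cases k' with
        | zero => simpa using hlt
        | succ j =>
          have hj : j < L.length := by simpa using hk'
          have := ih k0 d0 c0 hrec j hj (by omega)
          simpa using this
      · rw [if_neg hlt] at h
        simp only [Option.some.injEq, Prod.mk.injEq] at h
        obtain ⟨hk, hd, hc⟩ := h
        subst hk
        omega

lemma pvBest_nonneg (L : List (Int × Int × Int)) (v : Int × Int) (k : Nat) (d c : Int)
    (h : pvBest L v = some (k, d, c)) : 0 ≤ d := by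
  obtain ⟨hk, h1, _⟩ := pvBest_attain L v k d c h
  rw [← h1]
  exact pvDE_nonneg _ _

lemma pvBest_unique (L : List (Int × Int × Int)) (v : Int × Int) (k : Nat) (d : Int)
    (hk : k < L.length) (hd : pvDE L[k] v = d) (hlb : ∀ e ∈ L, d ≤ pvDE e v)
    (hfst : ∀ k', (hk' : k' < L.length) → k' < k → d < pvDE L[k'] v) :
    pvBest L v = some (k, d, L[k].2.2) := by
  cases hb : pvBest L v with
  | none =>
    have : L = [] := (pvBest_eq_none_iff L v).mp hb
    subst this
    simp at hk
  | some x =>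
    rcases x with ⟨k0, d0, c0⟩
    obtain ⟨hk0, ha1, ha2⟩ := pvBest_attain L v k0 d0 c0 hb
    have hlb0 := pvBest_lb L v k0 d0 c0 hb
    have hkk : k0 = k := by
      rcases Nat.lt_trichotomy k0 k with hc | hc | hc
      · have h1 := hfst k0 hk0 hc
        have h2 := hlb0 L[k] (List.getElem_mem hk)
        omega
      · exact hc
      · have h1 := pvBest_first L v k0 d0 c0 hb k hk hc
        have h2 := hlb L[k0] (List.getElem_mem hk0)
        omega
    subst hkk
    have hdd : d0 = d := by rw [← ha1, hd]
    rw [hdd, ha2]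

-- scanning with a running strict minimum, starting from an accumulator
lemma pvScan (v : Int × Int) :
    ∀ (L : List (Int × Int × Int)) (d0 c0 : Int),
      L.foldl
        (fun best e =>
          match best with
          | none => some (pvDE e v, e.2.2)
          | some b => if pvDE e v < b.1 then some (pvDE e v, e.2.2) else some b)
        (some (d0, c0)) =
      match pvBest L v with
      | some x => if x.2.1 < d0 then some (x.2.1, x.2.2) else some (d0, c0)
      | none => some (d0, c0) := by
  intro L
  induction L with
  | nil => intro d0 c0; simp [pvBest]
  | cons e L ih =>
    intro d0 c0
    simp only [List.foldl_cons]
    by_cases hlt : pvDE e v < d0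
    · rw [if_pos hlt, ih]
      cases hrec : pvBest L v with
      | none =>
        simp only [pvBest, hrec]
        rw [if_pos hlt]
      | some x =>
        rcases x with ⟨k, d, c⟩
        simp only [pvBest, hrec]
        by_cases hA : d < pvDE e v
        · simp only [if_pos hA]
          all_goals split_ifs <;> first | rfl | omega
        · simp only [if_neg hA]
          all_goals split_ifs <;> first | rfl | omega
    · rw [if_neg hlt, ih]
      cases hrec : pvBest L v with
      | none =>
        simp only [pvBest, hrec]
        rw [if_neg hlt]
      | some x =>
        rcases x with ⟨k, d, c⟩
        simp only [pvBest, hrec]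
        by_cases hA : d < pvDE e v
        · simp only [if_pos hA]
          all_goals split_ifs <;> first | rfl | omega
        · simp only [if_neg hA]
          all_goals split_ifs <;> first | rfl | omega

-- port B's inner fold computes the (distance, color) part of pvBest
lemma pvNearestB_eq (ss : List (List Int)) (i j : Int) :
    pvNearestB ss i j = (pvBest (ss.map pvTriple) (i, j)).map (fun x => (x.2.1, x.2.2)) := by
  have hfold : pvNearestB ss i j =
      (ss.map pvTriple).foldl
        (fun best e =>
          match best with
          | none => some (pvDE e (i, j), e.2.2)
          | some b => if pvDE e (i, j) < b.1 then some (pvDE e (i, j), e.2.2) else some b)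
        none := by
    rw [List.foldl_map]
    rfl
  rw [hfold]
  cases hL : ss.map pvTriple with
  | nil => simp [pvBest]
  | cons e L =>
    simp only [List.foldl_cons]
    rw [pvScan (i, j) L (pvDE e (i, j)) e.2.2]
    cases hrec : pvBest L (i, j) with
    | none => simp [pvBest, hrec]
    | some x =>
      rcases x with ⟨k, d, c⟩
      simp only [pvBest, hrec]
      by_cases hA : d < pvDE e (i, j)
      · simp only [if_pos hA]
        rfl
      · simp only [if_neg hA]
        rfl

-- ---------- geometry ----------

lemma pvGeomStep (m n : Int) (L : List (Int × Int × Int)) (hL : ∀ e ∈ L, pvOK m n e)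
    (v : Int × Int) (hv : pvInR m n v) (k : Nat) (d c : Int)
    (h : pvBest L v = some (k, d, c)) (hd : 1 ≤ d) :
    ∃ u, pvInR m n u ∧ |u.1 - v.1| + |u.2 - v.2| = 1 ∧ pvBest L u = some (k, d - 1, c) := by
  obtain ⟨hk, ha1, ha2⟩ := pvBest_attain L v k d c h
  have hlb := pvBest_lb L v k d c h
  have hfst := pvBest_first L v k d c h
  obtain ⟨ho1, ho2, ho3, ho4, ho5⟩ := hL L[k] (List.getElem_mem hk)
  obtain ⟨hv1, hv2, hv3, hv4⟩ := hv
  have hmain : ∃ u : Int × Int, pvInR m n u ∧ |u.1 - v.1| + |u.2 - v.2| = 1 ∧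
      pvDE L[k] u = d - 1 := by
    unfold pvDE at ha1
    rcases lt_trichotomy L[k].1 v.1 with hx | hx | hx
    · refine ⟨(v.1 - 1, v.2), ⟨by omega, by omega, hv3, hv4⟩, by norm_num, ?_⟩
      unfold pvDE
      have e1 : |L[k].1 - v.1| = v.1 - L[k].1 := by
        rcases pvAbs (L[k].1 - v.1) with ⟨a, b⟩ | ⟨a, b⟩ <;> omega
      have e2 : |L[k].1 - (v.1 - 1)| = v.1 - 1 - L[k].1 := by
        rcases pvAbs (L[k].1 - (v.1 - 1)) with ⟨a, b⟩ | ⟨a, b⟩ <;> omega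
      simp only [e2]
      omega
    · have e1 : |L[k].1 - v.1| = 0 := by rw [hx]; simp
      rcases lt_trichotomy L[k].2.1 v.2 with hy | hy | hy
      · refine ⟨(v.1, v.2 - 1), ⟨hv1, hv2, by omega, by omega⟩, by norm_num, ?_⟩
        unfold pvDE
        have e2 : |L[k].2.1 - v.2| = v.2 - L[k].2.1 := by
          rcases pvAbs (L[k].2.1 - v.2) with ⟨a, b⟩ | ⟨a, b⟩ <;> omega
        have e3 : |L[k].2.1 - (v.2 - 1)| = v.2 - 1 - L[k].2.1 := by
          rcases pvAbs (L[k].2.1 - (v.2 - 1)) with ⟨a, b⟩ | ⟨a, b⟩ <;> omega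
        simp only [e3]
        omega
      · exfalso
        have e2 : |L[k].2.1 - v.2| = 0 := by rw [hy]; simp
        omega
      · refine ⟨(v.1, v.2 + 1), ⟨hv1, hv2, by omega, by omega⟩, by norm_num, ?_⟩
        unfold pvDE
        have e2 : |L[k].2.1 - v.2| = L[k].2.1 - v.2 := by
          rcases pvAbs (L[k].2.1 - v.2) with ⟨a, b⟩ | ⟨a, b⟩ <;> omega
        have e3 : |L[k].2.1 - (v.2 + 1)| = L[k].2.1 - (v.2 + 1) := by
          rcases pvAbs (L[k].2.1 - (v.2 + 1)) with ⟨a, b⟩ | ⟨a, b⟩ <;> omega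
        simp only [e3]
        omega
    · refine ⟨(v.1 + 1, v.2), ⟨by omega, by omega, hv3, hv4⟩, by norm_num, ?_⟩
      unfold pvDE
      have e1 : |L[k].1 - v.1| = L[k].1 - v.1 := by
        rcases pvAbs (L[k].1 - v.1) with ⟨a, b⟩ | ⟨a, b⟩ <;> omega
      have e2 : |L[k].1 - (v.1 + 1)| = L[k].1 - (v.1 + 1) := by
        rcases pvAbs (L[k].1 - (v.1 + 1)) with ⟨a, b⟩ | ⟨a, b⟩ <;> omega
      simp only [e2]
      omega
  obtain ⟨u, hu1, hu2, hu3⟩ := hmain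
  refine ⟨u, hu1, hu2, ?_⟩
  have huniq := pvBest_unique L u k (d - 1) hk hu3 ?lb ?fst
  · rw [ha2] at huniq
    exact huniq
  case lb =>
    intro e he
    have h1 := (pvDE_adj e u v hu2).1
    have h2 := hlb e he
    omega
  case fst =>
    intro k' hk' hklt
    have h1 := (pvDE_adj L[k'] u v hu2).1
    have h2 := hfst k' hk' hklt
    omega

lemma pvGeomAdjK (L : List (Int × Int × Int)) (v u : Int × Int) (k : Nat) (d : Int) (c : Int)
    (h : pvBest L v = some (k, d, c)) (k' : Nat) (hk' : k' < L.length) (d' : Int)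
    (hd' : pvDE L[k'] u = d') (hadj : |u.1 - v.1| + |u.2 - v.2| = 1) (hdd : d' + 1 = d) :
    k ≤ k' := by
  by_contra hcon
  push_neg at hcon
  have h1 := pvBest_first L v k d c h k' hk' hcon
  have h2 := (pvDE_adj L[k'] u v hadj).1
  omega

lemma pvDescend (m n : Int) (L : List (Int × Int × Int)) (hL : ∀ e ∈ L, pvOK m n e) (t : Nat)
    (hnone : ∀ v k c, pvInR m n v → pvBest L v ≠ some (k, (t : Int), c)) :
    ∀ v k d c, pvInR m n v → pvBest L v = some (k, d, c) → d < (t : Int) := by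
  intro v k d c hv hb
  by_contra hcon
  push_neg at hcon
  have key : ∀ j : Nat, ∀ (v : Int × Int) (k : Nat) (d c : Int), pvInR m n v →
      pvBest L v = some (k, d, c) → d = (t : Int) + j → False := by
    intro j
    induction j with
    | zero =>
      intro v k d c hv hb hd
      have hd' : d = (t : Int) := by push_cast at hd; omega
      exact hnone v k c hv (hd' ▸ hb)
    | succ j ih =>
      intro v k d c hv hb hd
      have h1 : 1 ≤ d := by push_cast at hd; omega
      obtain ⟨u, hu1, hu2, hu3⟩ := pvGeomStep m n L hL v hv k d c hb h1
      exact ih u k (d - 1) c hu1 hu3 (by push_cast at hd ⊢; omega)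
  exact key (d - t).toNat v k d c hv hb (by omega)

-- ---------- grid primitives ----------

lemma pvAns0_eq (m n : Int) :
    ((PySem.List.pyRange 0 m 1).map (fun _ => PySem.List.pyRepeat [(0 : Int)] n)) =
      List.replicate m.toNat (List.replicate n.toNat 0) := by
  refine List.eq_replicate_iff.mpr ⟨by simp [PySem.List.length_pyRange_one], ?_⟩
  intro b hb
  simp only [List.mem_map] at hb
  obtain ⟨x, _, hb⟩ := hb
  rw [← hb, PySem.List.pyRepeat_singleton]

lemma pvShape_replicate (m n : Int) :
    pvShape m n (List.replicate m.toNat (List.replicate n.toNat 0)) := by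
  refine ⟨by simp, ?_⟩
  intro row hrow
  rw [List.eq_of_mem_replicate hrow]
  simp

lemma pvCv_replicate (m n : Int) (v : Int × Int) (hv : pvInR m n v) :
    pvCv (List.replicate m.toNat (List.replicate n.toNat 0)) v = 0 := by
  obtain ⟨hv1, hv2, hv3, hv4⟩ := hv
  unfold pvCv pvCell
  rw [PySem.List.pyGetD_eq_getElem _ _ hv1 (by simp; omega)]
  rw [List.getElem_replicate]
  rw [PySem.List.pyGetD_eq_getElem _ _ hv3 (by simp; omega)]
  simp

lemma pvShape_set (m n : Int) (g : List (List Int)) (hs : pvShape m n g) (r c x : Int)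
    (hr : pvInR m n (r, c)) : pvShape m n (pvSetCell g r c x) := by
  have hr1 : 0 ≤ r := hr.1
  have hr2 : r < m := hr.2.1
  have hr3 : 0 ≤ c := hr.2.2.1
  have hr4 : c < n := hr.2.2.2
  unfold pvSetCell
  rw [PySem.List.pySetD_of_nonneg _ _ hr1]
  refine ⟨by simp [hs.1], ?_⟩
  intro row hrow
  rcases List.mem_or_eq_of_mem_set hrow with hmem | heq
  · exact hs.2 row hmem
  · subst heq
    rw [PySem.List.pySetD_of_nonneg _ _ hr3, List.length_set]
    have hrlt : r < (g.length : Int) := by rw [hs.1]; omega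
    rw [PySem.List.pyGetD_eq_getElem _ _ hr1 hrlt]
    exact hs.2 _ (List.getElem_mem _)

lemma pvCv_set (m n : Int) (g : List (List Int)) (hs : pvShape m n g) (r c x : Int)
    (hr : pvInR m n (r, c)) (v : Int × Int) (hv : pvInR m n v) :
    pvCv (pvSetCell g r c x) v = if v = (r, c) then x else pvCv g v := by
  have hr1 : 0 ≤ r := hr.1
  have hr2 : r < m := hr.2.1
  have hr3 : 0 ≤ c := hr.2.2.1
  have hr4 : c < n := hr.2.2.2
  obtain ⟨hv1, hv2, hv3, hv4⟩ := hv
  have hm0 : (0 : Int) ≤ m := by omega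
  have hrlt : r < (g.length : Int) := by rw [hs.1]; omega
  have hvlt : v.1 < (g.length : Int) := by rw [hs.1]; omega
  have hrowg : PySem.List.pyGetD g r [] = g[r.toNat]'(by omega) :=
    PySem.List.pyGetD_eq_getElem _ _ hr1 hrlt
  have hrowlen : ∀ (i : Nat) (hi : i < g.length), (g[i]'hi).length = n.toNat := by
    intro i hi
    exact hs.2 _ (List.getElem_mem hi)
  unfold pvSetCell pvCv pvCell
  rw [PySem.List.pySetD_of_nonneg _ _ hr1, PySem.List.pySetD_of_nonneg _ _ hr3, hrowg]
  rw [PySem.List.pyGetD_eq_getElem _ _ hv1 (by simp; omega)]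
  rw [List.getElem_set]
  by_cases hcr : r.toNat = v.1.toNat
  · simp only [if_pos hcr]
    have hrv : v.1 = r := by omega
    rw [PySem.List.pyGetD_eq_getElem _ _ hv3
      (by rw [List.length_set, hrowlen r.toNat (by omega)]; omega)]
    rw [List.getElem_set]
    by_cases hcc : c.toNat = v.2.toNat
    · have hvc : v.2 = c := by omega
      simp only [if_pos hcc]
      have : v = (r, c) := by
        rcases v with ⟨a, b⟩
        simp only [Prod.mk.injEq]
        exact ⟨hrv, hvc⟩
      rw [if_pos this]
    · have hvc : ¬(v.2 = c) := by omega
      simp only [if_neg hcc]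
      have hne : ¬(v = (r, c)) := by
        rcases v with ⟨a, b⟩
        simp only [Prod.mk.injEq, not_and]
        intro _
        simpa using hvc
      rw [if_neg hne]
      rw [PySem.List.pyGetD_eq_getElem _ _ hv1 hvlt]
      rw [PySem.List.pyGetD_eq_getElem _ _ hv3 (by rw [hrowlen v.1.toNat (by omega)]; omega)]
      simp only [hcr]
  · simp only [if_neg hcr]
    have hne : ¬(v = (r, c)) := by
      rcases v with ⟨a, b⟩
      simp only [Prod.mk.injEq, not_and]
      intro ha
      exfalso
      apply hcr
      omega
    rw [if_neg hne]
    rw [PySem.List.pyGetD_eq_getElem _ _ hv1 hvlt]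

lemma pvCount_set : ∀ (l : List Int) (kk : Nat) (x : Int) (hk : kk < l.length),
    l[kk] = 0 → x ≠ 0 →
    (l.set kk x).countP (fun y => y == 0) + 1 = l.countP (fun y => y == 0) := by
  intro l
  induction l with
  | nil => intro kk x h; simp at h
  | cons a l ih =>
    intro kk x hk h0 hx
    
    cases kk with
    | zero =>
      simp only [List.getElem_cons_zero] at h0
      subst h0
      simp only [List.set_cons_zero, List.countP_cons]
      simp [hx]
    | succ j =>
      simp only [List.getElem_cons_succ] at h0
      rw [List.set_cons_succ]
      simp only [List.countP_cons]
      have := ih j x (by simpa using hk) h0 hx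
      omega

lemma pvZ_set_aux : ∀ (g : List (List Int)) (rt : Nat) (row' : List Int) (h : rt < g.length),
    pvZ (g.set rt row') + (g[rt]'h).countP (fun y => y == 0) =
      pvZ g + row'.countP (fun y => y == 0) := by
  intro g
  induction g with
  | nil => intro rt row' h; simp at h
  | cons row g ih =>
    intro rt row' h
    cases rt with
    | zero =>
      simp only [List.set_cons_zero, List.getElem_cons_zero]
      unfold pvZ
      simp only [List.map_cons, List.sum_cons]
      omega
    | succ j =>
      rw [List.set_cons_succ]
      simp only [List.getElem_cons_succ]
      have := ih j row' (by simpa using h)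
      unfold pvZ at this ⊢
      simp only [List.map_cons, List.sum_cons]
      omega

lemma pvZ_set (m n : Int) (g : List (List Int)) (hs : pvShape m n g) (r c x : Int)
    (hr : pvInR m n (r, c)) (h0 : pvCv g (r, c) = 0) (hx : x ≠ 0) :
    pvZ (pvSetCell g r c x) + 1 = pvZ g := by
  have hr1 : 0 ≤ r := hr.1
  have hr2 : r < m := hr.2.1
  have hr3 : 0 ≤ c := hr.2.2.1
  have hr4 : c < n := hr.2.2.2
  have hrlt : r.toNat < g.length := by rw [hs.1]; omega
  have hrowg : PySem.List.pyGetD g r [] = g[r.toNat]'hrlt :=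
    PySem.List.pyGetD_eq_getElem _ _ hr1 (by omega)
  have hrowlen : (g[r.toNat]'hrlt).length = n.toNat := hs.2 _ (List.getElem_mem hrlt)
  have hclt : c.toNat < (g[r.toNat]'hrlt).length := by omega
  have hcell : (g[r.toNat]'hrlt)[c.toNat]'hclt = 0 := by
    unfold pvCv pvCell at h0
    rw [hrowg] at h0
    rw [PySem.List.pyGetD_eq_getElem _ _ hr3 (by omega)] at h0
    exact h0
  unfold pvSetCell
  rw [PySem.List.pySetD_of_nonneg _ _ hr1, PySem.List.pySetD_of_nonneg _ _ hr3, hrowg]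
  have haux := pvZ_set_aux g r.toNat ((g[r.toNat]'hrlt).set c.toNat x) hrlt
  have hcnt := pvCount_set (g[r.toNat]'hrlt) c.toNat x hclt hcell hx
  omega

lemma pvZ_le (m n : Int) (g : List (List Int)) (hs : pvShape m n g) :
    pvZ g ≤ m.toNat * n.toNat := by
  obtain ⟨h1, h2⟩ := hs
  unfold pvZ
  have := List.sum_le_card_nsmul (g.map (fun row => row.countP (fun x => x == 0))) n.toNat ?_
  · simpa [h1] using this
  · intro x hx
    simp only [List.mem_map] at hx
    obtain ⟨row, hrow, hx⟩ := hx
    rw [← hx]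
    calc row.countP (fun x => x == 0) ≤ row.length := List.countP_le_length
      _ = n.toNat := h2 row hrow

-- ---------- seeding ----------

lemma pvSeedVal_append (L : List (Int × Int × Int)) (e : Int × Int × Int) (v : Int × Int) :
    pvSeedVal (L ++ [e]) v =
      if e.1 = v.1 ∧ e.2.1 = v.2 then some e.2.2 else pvSeedVal L v := by
  unfold pvSeedVal
  rw [List.reverse_append]
  simp only [List.reverse_cons, List.reverse_nil, List.nil_append, List.singleton_append,
    List.find?_cons]
  by_cases h1 : e.1 = v.1
  · by_cases h2 : e.2.1 = v.2
    · simp [h1, h2]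
    · have hb : (e.2.1 == v.2) = false := by simp [h2]
      simp [h1, h2, hb]
  · have hb : (e.1 == v.1) = false := by simp [h1]
    simp [h1, hb]

lemma pvSeedVal_none_iff (L : List (Int × Int × Int)) (v : Int × Int) :
    pvSeedVal L v = none ↔ ∀ e ∈ L, ¬(e.1 = v.1 ∧ e.2.1 = v.2) := by
  unfold pvSeedVal
  simp [List.find?_eq_none, List.mem_reverse]

lemma pvSeedVal_nonzero (m n : Int) (L : List (Int × Int × Int)) (hL : ∀ e ∈ L, pvOK m n e)
    (v : Int × Int) (c : Int) (h : pvSeedVal L v = some c) : c ≠ 0 := by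
  unfold pvSeedVal at h
  obtain ⟨e0, hf, hc⟩ := Option.map_eq_some_iff.mp h
  have hmem := List.mem_of_find?_eq_some hf
  rw [List.mem_reverse] at hmem
  have := hL e0 hmem
  rw [← hc]
  exact this.2.2.2.2

-- the seeding loop (named copy of the loop body, then its three properties)
def pvSeedStep (st : List (List Int) × List (Int × Int × Int)) (s : List Int) :
    List (List Int) × List (Int × Int × Int) :=
  (pvSetCell st.1 (PySem.List.pyGetD s 0 0) (PySem.List.pyGetD s 1 0)
    (PySem.List.pyGetD s 2 0),
   st.2 ++ [(PySem.List.pyGetD s 0 0, PySem.List.pyGetD s 1 0, PySem.List.pyGetD s 2 0)])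

lemma pvSeed_acc (ss : List (List Int)) : ∀ (g : List (List Int)) (acc : List (Int × Int × Int)),
    ss.foldl pvSeedStep (g, acc) = ((ss.foldl pvSeedStep (g, [])).1, acc ++ ss.map pvTriple) := by
  induction ss with
  | nil => intro g acc; simp
  | cons s ss ih =>
    intro g acc
    simp only [List.foldl_cons, List.map_cons]
    have h1 : pvSeedStep (g, acc) s = ((pvSeedStep (g, []) s).1, acc ++ [pvTriple s]) := rfl
    have h2 : pvSeedStep (g, []) s = ((pvSeedStep (g, []) s).1, [] ++ [pvTriple s]) := rfl
    rw [h1, ih (pvSeedStep (g, []) s).1 (acc ++ [pvTriple s])]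
    conv_rhs => rw [h2, ih (pvSeedStep (g, []) s).1 ([] ++ [pvTriple s])]
    simp [List.append_assoc]

lemma pvSeed_shape (m n : Int) (ss : List (List Int)) :
    ∀ (g : List (List Int)) (acc : List (Int × Int × Int)),
      (∀ s ∈ ss, pvOK m n (pvTriple s)) → pvShape m n g →
      pvShape m n ((ss.foldl pvSeedStep (g, acc)).1) := by
  induction ss with
  | nil => intro g acc _ hg; simpa using hg
  | cons s ss ih =>
    intro g acc hss hg
    simp only [List.foldl_cons]
    apply ih _ _ (fun s' hs' => hss s' (List.mem_cons_of_mem _ hs'))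
    have h := hss s List.mem_cons_self
    exact pvShape_set m n g hg _ _ _ ⟨h.1, h.2.1, h.2.2.1, h.2.2.2.1⟩

lemma pvSeed_cv (m n : Int) (ss : List (List Int)) (g : List (List Int))
    (hg : pvShape m n g) (v : Int × Int) (hv : pvInR m n v)
    (hss : ∀ s ∈ ss, pvOK m n (pvTriple s)) :
    pvCv ((ss.foldl pvSeedStep (g, [])).1) v =
      match pvSeedVal (ss.map pvTriple) v with
      | some c => c
      | none => pvCv g v := by
  revert hss
  induction ss using List.reverseRecOn with
  | nil => intro _; simp [pvSeedVal]
  | append_singleton ss s ih =>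
    intro hss
    have hsmem : pvOK m n (pvTriple s) := hss s (by simp)
    have hss' : ∀ s' ∈ ss, pvOK m n (pvTriple s') := fun s' h' => hss s' (by simp [h'])
    have hshape := pvSeed_shape m n ss g [] hss' hg
    rw [List.foldl_append]
    simp only [List.foldl_cons, List.foldl_nil]
    have hrIn : pvInR m n ((pvTriple s).1, (pvTriple s).2.1) :=
      ⟨hsmem.1, hsmem.2.1, hsmem.2.2.1, hsmem.2.2.2.1⟩
    have hkey : pvCv ((pvSeedStep (ss.foldl pvSeedStep (g, [])) s).1) v =
        if v = ((pvTriple s).1, (pvTriple s).2.1) then (pvTriple s).2.2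
        else pvCv ((ss.foldl pvSeedStep (g, [])).1) v :=
      pvCv_set m n _ hshape _ _ _ hrIn v hv
    rw [hkey, List.map_append, List.map_cons, List.map_nil, pvSeedVal_append]
    rcases v with ⟨v1, v2⟩
    by_cases hcond : (v1, v2) = ((pvTriple s).1, (pvTriple s).2.1)
    · rw [if_pos hcond]
      simp only [Prod.mk.injEq] at hcond
      rw [if_pos ⟨hcond.1.symm, hcond.2.symm⟩]
    · rw [if_neg hcond]
      simp only [Prod.mk.injEq] at hcond
      rw [if_neg (by intro hcc; exact hcond ⟨hcc.1.symm, hcc.2.symm⟩)]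
      exact ih hss'

-- port B's dict of seeds agrees with pvSeedVal
lemma pvDict_fold (ss : List (List Int)) (i j : Int) :
    PySem.Dict.get?
      (ss.foldl
        (fun (d : PySem.Dict (Int × Int) Int) s =>
          d.insert (PySem.List.pyGetD s 0 0, PySem.List.pyGetD s 1 0) (PySem.List.pyGetD s 2 0))
        PySem.Dict.empty) (i, j) =
      pvSeedVal (ss.map pvTriple) (i, j) := by
  induction ss using List.reverseRecOn with
  | nil => simp [pvSeedVal, PySem.Dict.get?_empty]
  | append_singleton ss s ih =>
    rw [List.foldl_append]
    simp only [List.foldl_cons, List.foldl_nil]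
    rw [PySem.Dict.get?_insert]
    rw [List.map_append, List.map_cons, List.map_nil, pvSeedVal_append]
    simp only [pvTriple]
    by_cases h : PySem.List.pyGetD s 0 0 = i ∧ PySem.List.pyGetD s 1 0 = j
    · rw [if_pos (by simp [Prod.ext_iff]; exact ⟨h.1.symm, h.2.symm⟩),
        if_pos h]
    · rw [if_neg (by simp [Prod.ext_iff]; intro h1 h2; exact h ⟨h1.symm, h2.symm⟩),
        if_neg h]
      exact ih

-- ---------- pvAnn ----------

lemma pvAnn_map_fst (L : List (Int × Int × Int)) (k : Nat) :
    (pvAnn L k).map Prod.fst = L := by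
  induction L generalizing k with
  | nil => simp [pvAnn]
  | cons e L ih => simp [pvAnn, ih]

lemma pvAnn_mem (L : List (Int × Int × Int)) (k : Nat) (p : (Int × Int × Int) × Nat) :
    p ∈ pvAnn L k ↔ ∃ j, ∃ hj : j < L.length, p = (L[j], k + j) := by
  induction L generalizing k with
  | nil => simp [pvAnn]
  | cons e L ih =>
    simp only [pvAnn, List.mem_cons, ih]
    constructor
    · rintro (rfl | ⟨j, hj, rfl⟩)
      · exact ⟨0, by simp, by simp⟩
      · refine ⟨j + 1, by simpa using Nat.succ_lt_succ hj, ?_⟩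
        simp only [List.getElem_cons_succ]
        congr 1
        omega
    · rintro ⟨j, hj, rfl⟩
      cases j with
      | zero => left; simp
      | succ j =>
        right
        refine ⟨j, by simpa using hj, ?_⟩
        simp only [List.getElem_cons_succ]
        congr 1
        omega

lemma pvAnn_snd_mono (L : List (Int × Int × Int)) (k : Nat) :
    ((pvAnn L k).map Prod.snd).Pairwise (· ≤ ·) := by
  induction L generalizing k with
  | nil => simp [pvAnn]
  | cons e L ih =>
    simp only [pvAnn, List.map_cons, List.pairwise_cons]
    refine ⟨?_, ih (k + 1)⟩
    intro b hb
    simp only [List.mem_map] at hb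
    obtain ⟨p, hp, hb⟩ := hb
    obtain ⟨j, hj, hpe⟩ := (pvAnn_mem L (k + 1) p).mp hp
    subst hpe
    subst hb
    simp
    omega

-- ---------- port-A loop plumbing ----------

lemma pvExpand_eq (m n : Int) (g : List (List Int)) (e : Int × Int × Int) :
    pvExpand m n g e =
      [((-1 : Int), (0 : Int)), (0, -1), (1, 0), (0, 1)].foldl (pvStepE m n e) (g, []) := rfl

lemma pvStepE_acc (m n : Int) (e : Int × Int × Int) (ds : List (Int × Int))
    (g : List (List Int)) (acc : List (Int × Int × Int)) :
    ds.foldl (pvStepE m n e) (g, acc) =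
      ((ds.foldl (pvStepE m n e) (g, [])).1, acc ++ (ds.foldl (pvStepE m n e) (g, [])).2) := by
  induction ds generalizing g acc with
  | nil => simp
  | cons d ds ih =>
    simp only [List.foldl_cons]
    have hstep : pvStepE m n e (g, acc) d =
        ((pvStepE m n e (g, []) d).1, acc ++ (pvStepE m n e (g, []) d).2) := by
      simp only [pvStepE]
      split_ifs <;> simp
    have e1 : List.foldl (pvStepE m n e) (pvStepE m n e (g, acc) d) ds =
        ((List.foldl (pvStepE m n e) ((pvStepE m n e (g, []) d).1, []) ds).1,
          (acc ++ (pvStepE m n e (g, []) d).2) ++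
            (List.foldl (pvStepE m n e) ((pvStepE m n e (g, []) d).1, []) ds).2) := by
      rw [hstep]
      exact ih (pvStepE m n e (g, []) d).1 (acc ++ (pvStepE m n e (g, []) d).2)
    have e2 : List.foldl (pvStepE m n e) (pvStepE m n e (g, []) d) ds =
        ((List.foldl (pvStepE m n e) ((pvStepE m n e (g, []) d).1, []) ds).1,
          (pvStepE m n e (g, []) d).2 ++
            (List.foldl (pvStepE m n e) ((pvStepE m n e (g, []) d).1, []) ds).2) :=
      ih (pvStepE m n e (g, []) d).1 (pvStepE m n e (g, []) d).2
    rw [e1, e2]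
    simp [List.append_assoc]

lemma pvPL_acc (m n : Int) (q : List (Int × Int × Int)) (g : List (List Int))
    (acc : List (Int × Int × Int)) :
    q.foldl (fun st e => ((pvExpand m n st.1 e).1, st.2 ++ (pvExpand m n st.1 e).2)) (g, acc) =
      ((pvPL m n g q).1, acc ++ (pvPL m n g q).2) := by
  induction q generalizing g acc with
  | nil => simp [pvPL]
  | cons e q ih =>
    simp only [pvPL, List.foldl_cons]
    rw [ih (pvExpand m n g e).1 (acc ++ (pvExpand m n g e).2),
      ih (pvExpand m n g e).1 ([] ++ (pvExpand m n g e).2)]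
    simp only [pvPL, List.nil_append]
    simp [List.append_assoc]

lemma pvBFS_nil (m n : Int) (f : Nat) (g : List (List Int)) : pvBFS m n f g [] = g := by
  cases f <;> rfl

lemma pvBFS_chunk (m n : Int) (q : List (Int × Int × Int)) :
    ∀ (b : List (Int × Int × Int)) (g : List (List Int)) (f : Nat),
      pvBFS m n (q.length + f) g (q ++ b) =
        pvBFS m n f (pvPL m n g q).1 (b ++ (pvPL m n g q).2) := by
  induction q with
  | nil => intro b g f; simp [pvPL]
  | cons e q ih =>
    intro b g f
    have h1 : (e :: q).length + f = (q.length + f) + 1 := by simp [List.length_cons]; omega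
    rw [h1]
    have h2 : pvBFS m n ((q.length + f) + 1) g ((e :: q) ++ b) =
        pvBFS m n (q.length + f) (pvExpand m n g e).1 ((q ++ b) ++ (pvExpand m n g e).2) := by
      simp only [List.cons_append, pvBFS]
    rw [h2]
    have h3 : (q ++ b) ++ (pvExpand m n g e).2 = q ++ (b ++ (pvExpand m n g e).2) := by
      simp [List.append_assoc]
    rw [h3, ih (b ++ (pvExpand m n g e).2) (pvExpand m n g e).1 f]
    have h4 : pvPL m n g (e :: q) =
        ((pvPL m n (pvExpand m n g e).1 q).1,
          (pvExpand m n g e).2 ++ (pvPL m n (pvExpand m n g e).1 q).2) := by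
      simp only [pvPL, List.foldl_cons]
      rw [pvPL_acc m n q (pvExpand m n g e).1 ([] ++ (pvExpand m n g e).2)]
      simp [pvPL]
    rw [h4]
    simp [List.append_assoc]

-- ---------- the core induction ----------

-- processing the direction list of one queue entry preserves the invariant
lemma pvDirsStep (m n : Int) (L : List (Int × Int × Int)) (hL : ∀ e ∈ L, pvOK m n e) (t : Nat)
    (e : Int × Int × Int) (ke : Nat) (Q2 : List ((Int × Int × Int) × Nat)) :
    ∀ (ds : List (Int × Int)) (h : List (List Int)) (New : List ((Int × Int × Int) × Nat)),
      (∀ d ∈ ds, |d.1| + |d.2| = 1) →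
      pvInv m n L t h New ((e, ke) :: Q2) →
      ∃ h' New',
        ds.foldl (pvStepE m n e) (h, New.map Prod.fst) = (h', New'.map Prod.fst) ∧
        pvInv m n L t h' New' ((e, ke) :: Q2) ∧
        pvZ h' + New'.length = pvZ h + New.length ∧
        (∀ v, pvInR m n v → pvCv h v ≠ 0 → pvCv h' v = pvCv h v) ∧
        (∀ d ∈ ds, pvInR m n (e.1 + d.1, e.2.1 + d.2) → pvCv h' (e.1 + d.1, e.2.1 + d.2) ≠ 0) := by
  intro ds
  induction ds with
  | nil =>
    intro h New _ hI
    exact ⟨h, New, rfl, hI, rfl, fun v _ _ => rfl, by simp⟩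
  | cons d ds ih =>
    intro h New hds hI
    have hd1 : |d.1| + |d.2| = 1 := hds d List.mem_cons_self
    have hds' : ∀ d' ∈ ds, |d'.1| + |d'.2| = 1 := fun d' hd' => hds d' (List.mem_cons_of_mem _ hd')
    obtain ⟨hke, hdE, hcol, hcellIn⟩ := hI.qok (e, ke) List.mem_cons_self
    have hke' : ke < L.length := hke
    have hdE2 : pvDE (L[ke]'hke') (e.1, e.2.1) = (t : Int) := hdE
    have hcol2 : (L[ke]'hke').2.2 = e.2.2 := hcol
    simp only [List.foldl_cons]
    by_cases hc : 0 ≤ e.1 + d.1 ∧ e.1 + d.1 < m ∧ 0 ≤ e.2.1 + d.2 ∧ e.2.1 + d.2 < n ∧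
        pvCell h (e.1 + d.1) (e.2.1 + d.2) = 0
    case neg =>
      have hstep : pvStepE m n e (h, New.map Prod.fst) d = (h, New.map Prod.fst) := by
        simp only [pvStepE]
        rw [if_neg hc]
      rw [hstep]
      obtain ⟨h', New', hfold, hI', hZ, hmono, hnb⟩ := ih h New hds' hI
      refine ⟨h', New', hfold, hI', hZ, hmono, ?_⟩
      intro d' hd' hin
      rcases List.mem_cons.mp hd' with rfl | hd'
      · have hcv : pvCv h (e.1 + d'.1, e.2.1 + d'.2) ≠ 0 := by
          intro h0
          exact hc ⟨hin.1, hin.2.1, hin.2.2.1, hin.2.2.2, h0⟩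
        rw [hmono _ hin hcv]
        exact hcv
      · exact hnb d' hd' hin
    case pos =>
      obtain ⟨hc1, hc2, hc3, hc4, hc5⟩ := hc
      set v : Int × Int := (e.1 + d.1, e.2.1 + d.2) with hvdef
      have hvin : pvInR m n v := ⟨hc1, hc2, hc3, hc4⟩
      have hcv0 : pvCv h v = 0 := hc5
      have hadj : |e.1 - v.1| + |e.2.1 - v.2| = 1 := by
        show |e.1 - (e.1 + d.1)| + |e.2.1 - (e.2.1 + d.2)| = 1
        have h1 : e.1 - (e.1 + d.1) = -d.1 := by ring
        have h2 : e.2.1 - (e.2.1 + d.2) = -d.2 := by ring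
        rw [h1, h2, abs_neg, abs_neg]
        exact hd1
      have hLne : L ≠ [] := by
        intro hL0
        rw [hL0] at hke
        simp at hke
      obtain ⟨x, hbv⟩ : ∃ x, pvBest L v = some x := by
        cases hb : pvBest L v with
        | none => exact absurd ((pvBest_eq_none_iff L v).mp hb) hLne
        | some x => exact ⟨x, rfl⟩
      rcases x with ⟨kv, dv, cv⟩
      obtain ⟨hkv, hav1, hav2⟩ := pvBest_attain L v kv dv cv hbv
      have hcvne : cv ≠ 0 := by
        rw [← hav2]
        exact (hL _ (List.getElem_mem hkv)).2.2.2.2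
      have hseednone : pvSeedVal L v = none := by
        cases hsv : pvSeedVal L v with
        | none => rfl
        | some c' =>
          exfalso
          have hval := hI.seedv v hvin (by rw [hsv]; simp)
          rw [hsv] at hval
          simp only [Option.getD_some] at hval
          exact (pvSeedVal_nonzero m n L hL v c' hsv) (by rw [← hval]; exact hcv0)
      have hdvle : dv ≤ (t : Int) + 1 := by
        have h1 := pvBest_lb L v kv dv cv hbv (L[ke]'hke') (List.getElem_mem hke')
        have h2 := (pvDE_adj (L[ke]'hke') (e.1, e.2.1) v hadj).1
        omega
      have hdvge : (t : Int) + 1 ≤ dv := by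
        by_contra hlt
        push_neg at hlt
        have := hI.settled v kv dv cv hvin hseednone hbv (by omega)
        rw [this] at hcv0
        exact hcvne hcv0
      have hdveq : dv = (t : Int) + 1 := le_antisymm hdvle hdvge
      subst hdveq
      obtain ⟨p0, hp0mem, hp0k, hp0adj⟩ := hI.reach v kv cv hvin hbv hcv0
      have hkeq : ke = kv := by
        have hge : kv ≤ ke :=
          pvGeomAdjK L v (e.1, e.2.1) kv ((t : Int) + 1) cv hbv ke hke' (t : Int) hdE2 hadj rfl
        have hle : ke ≤ kv := by
          rcases List.mem_cons.mp hp0mem with heq | hmem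
          · rw [heq] at hp0k
            exact le_of_eq hp0k
          · have hpw := hI.qmono
            simp only [List.map_cons] at hpw
            have := (List.pairwise_cons.mp hpw).1 p0.2 (List.mem_map_of_mem hmem)
            omega
        omega
      have hcveq : cv = e.2.2 := by
        rw [← hav2]
        simp only [← hkeq]
        exact hcol2
      have hset : ∀ w, pvInR m n w → pvCv (pvSetCell h v.1 v.2 e.2.2) w =
          if w = (v.1, v.2) then e.2.2 else pvCv h w :=
        fun w hw => pvCv_set m n h hI.shape v.1 v.2 e.2.2 (by exact hvin) w hw
      have hstep : pvStepE m n e (h, New.map Prod.fst) d =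
          (pvSetCell h v.1 v.2 e.2.2, (New ++ [((v.1, v.2, e.2.2), ke)]).map Prod.fst) := by
        simp only [pvStepE]
        rw [if_pos ⟨hc1, hc2, hc3, hc4, hc5⟩]
        simp only [List.map_append, List.map_cons, List.map_nil, Prod.mk.injEq]
        exact ⟨rfl, rfl⟩
      rw [hstep]
      have hbv' : pvBest L (v.1, v.2) = some (ke, (t : Int) + 1, e.2.2) := by
        rw [hcveq] at hbv
        simp only [← hkeq] at hbv
        exact hbv
      have hIv : pvInv m n L t (pvSetCell h v.1 v.2 e.2.2)
          (New ++ [((v.1, v.2, e.2.2), ke)]) ((e, ke) :: Q2) := by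
        refine ⟨?_, ?_, ?_, ?_, ?_, ?_, ?_, ?_, ?_, ?_, ?_, ?_, ?_⟩
        · exact pvShape_set m n h hI.shape _ _ _ (by exact hvin)
        · intro w hw hne
          rw [hset w hw]
          have hwv : ¬ w = (v.1, v.2) := by
            intro hwv
            rw [show w = v from hwv] at hne
            exact hne hseednone
          rw [if_neg hwv]
          exact hI.seedv w hw hne
        · intro w k0 d0 c0 hw hsn hb0 hd0
          rw [hset w hw]
          have hwv : ¬ w = (v.1, v.2) := by
            intro hwv
            have hbw : pvBest L w = some (kv, (t : Int) + 1, cv) := by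
              rw [show w = v from hwv]
              exact hbv
            rw [hb0] at hbw
            simp only [Option.some.injEq, Prod.mk.injEq] at hbw
            omega
          rw [if_neg hwv]
          exact hI.settled w k0 d0 c0 hw hsn hb0 hd0
        · intro w k0 c0 hw hb0 hex
          rw [hset w hw]
          by_cases hwv : w = (v.1, v.2)
          · rw [if_pos hwv]
            have hbw : pvBest L w = some (kv, (t : Int) + 1, cv) := by
              rw [show w = v from hwv]
              exact hbv
            rw [hb0] at hbw
            simp only [Option.some.injEq, Prod.mk.injEq] at hbw
            omega
          · rw [if_neg hwv]
            apply hI.claimedv w k0 c0 hw hb0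
            obtain ⟨p, hp, hpc⟩ := hex
            rcases List.mem_append.mp hp with hp | hp
            · exact ⟨p, hp, hpc⟩
            · exfalso
              simp only [List.mem_singleton] at hp
              rw [hp] at hpc
              exact hwv hpc.symm
        · intro w k0 c0 hw hb0 hall
          have hwv : ¬ w = (v.1, v.2) := by
            intro hwv
            exact (hall ((v.1, v.2, e.2.2), ke)
              (List.mem_append_right _ List.mem_cons_self)) (by rw [hwv])
          rw [hset w hw, if_neg hwv]
          exact hI.unclaimed w k0 c0 hw hb0 (fun p hp => hall p (List.mem_append_left _ hp))
        · intro w k0 d0 c0 hw hb0 hgt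
          have hwv : ¬ w = (v.1, v.2) := by
            intro hwv
            have hbw : pvBest L w = some (kv, (t : Int) + 1, cv) := by
              rw [show w = v from hwv]
              exact hbv
            rw [hb0] at hbw
            simp only [Option.some.injEq, Prod.mk.injEq] at hbw
            omega
          rw [hset w hw, if_neg hwv]
          exact hI.far w k0 d0 c0 hw hb0 hgt
        · intro w hw hb0
          exact ((hLne ((pvBest_eq_none_iff L w).mp hb0)).elim)
        · intro p hp
          rcases List.mem_append.mp hp with hp | hp
          · exact hI.newok p hp
          · simp only [List.mem_singleton] at hp
            subst hp
            exact ⟨by exact hvin, hbv'⟩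
        · simp only [List.map_append]
          rw [List.pairwise_append]
          refine ⟨hI.newmono, by simp, ?_⟩
          intro a ha b hb
          simp only [List.map_cons, List.map_nil, List.mem_singleton] at hb
          subst hb
          obtain ⟨p, hp, rfl⟩ := List.mem_map.mp ha
          exact hI.newq p hp _ List.mem_cons_self
        · intro p hp q hq
          rcases List.mem_append.mp hp with hp | hp
          · exact hI.newq p hp q hq
          · simp only [List.mem_singleton] at hp
            subst hp
            rcases List.mem_cons.mp hq with heq | hq
            · rw [heq]
            · have hpw := hI.qmono
              simp only [List.map_cons] at hpw
              exact (List.pairwise_cons.mp hpw).1 q.2 (List.mem_map_of_mem hq)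
        · exact hI.qmono
        · exact hI.qok
        · intro w k0 c0 hw hb0 h0
          have hwv : ¬ w = (v.1, v.2) := by
            intro hwv
            rw [hset w hw, if_pos hwv] at h0
            exact hcvne (by rw [hcveq]; exact h0)
          rw [hset w hw, if_neg hwv] at h0
          exact hI.reach w k0 c0 hw hb0 h0
      have hZ1 : pvZ (pvSetCell h v.1 v.2 e.2.2) + 1 = pvZ h :=
        pvZ_set m n h hI.shape v.1 v.2 e.2.2 (by exact hvin) (by exact hcv0)
          (by rw [← hcveq]; exact hcvne)
      obtain ⟨h', New', hfold, hI', hZ', hmono, hnb⟩ :=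
        ih (pvSetCell h v.1 v.2 e.2.2) (New ++ [((v.1, v.2, e.2.2), ke)]) hds' hIv
      refine ⟨h', New', hfold, hI', ?_, ?_, ?_⟩
      · simp only [List.length_append, List.length_cons, List.length_nil] at hZ'
        omega
      · intro w hw hwne
        have hwv : ¬ w = (v.1, v.2) := by
          intro hwv
          rw [show w = v from hwv] at hwne
          exact hwne hcv0
        have hne2 : pvCv (pvSetCell h v.1 v.2 e.2.2) w = pvCv h w := by
          rw [hset w hw, if_neg hwv]
        rw [hmono w hw (by rw [hne2]; exact hwne), hne2]
      · intro d' hd' hin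
        rcases List.mem_cons.mp hd' with rfl | hd'
        · have hv1 : pvCv (pvSetCell h v.1 v.2 e.2.2) v = e.2.2 := by
            rw [hset v hvin, if_pos rfl]
          have hpres := hmono v hvin (by rw [hv1, ← hcveq]; exact hcvne)
          have : pvCv h' v = e.2.2 := by rw [hpres, hv1]
          rw [this, ← hcveq]
          exact hcvne
        · exact hnb d' hd' hin

-- processing the whole remaining queue
lemma pvInnerStep (m n : Int) (L : List (Int × Int × Int)) (hL : ∀ e ∈ L, pvOK m n e) (t : Nat) :
    ∀ (Q2 : List ((Int × Int × Int) × Nat)) (h : List (List Int))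
      (New : List ((Int × Int × Int) × Nat)),
      pvInv m n L t h New Q2 →
      ∃ h' New',
        (Q2.map Prod.fst).foldl
          (fun st e => ((pvExpand m n st.1 e).1, st.2 ++ (pvExpand m n st.1 e).2))
          (h, New.map Prod.fst) = (h', New'.map Prod.fst) ∧
        pvInv m n L t h' New' [] ∧
        pvZ h' + New'.length = pvZ h + New.length := by
  intro Q2
  induction Q2 with
  | nil =>
    intro h New hI
    exact ⟨h, New, rfl, hI, rfl⟩
  | cons p Q2 ih =>
    intro h New hI
    rcases p with ⟨e, ke⟩
    simp only [List.map_cons, List.foldl_cons]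
    obtain ⟨h₁, New₁, hfold₁, hI₁, hZ₁, hmono₁, hnb₁⟩ :=
      pvDirsStep m n L hL t e ke Q2 [((-1 : Int), (0 : Int)), (0, -1), (1, 0), (0, 1)] h New
        (by intro d hd; fin_cases hd <;> norm_num) hI
    have hstep1 : ((pvExpand m n h e).1, (New.map Prod.fst) ++ (pvExpand m n h e).2) =
        (h₁, New₁.map Prod.fst) := by
      rw [pvExpand_eq, ← pvStepE_acc m n e _ h (New.map Prod.fst)]
      exact hfold₁
    have hI₂ : pvInv m n L t h₁ New₁ Q2 := by
      refine ⟨hI₁.shape, hI₁.seedv, hI₁.settled, hI₁.claimedv, hI₁.unclaimed, hI₁.far, hI₁.nosrc,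
        hI₁.newok, hI₁.newmono, ?_, ?_, ?_, ?_⟩
      · exact fun p hp q hq => hI₁.newq p hp q (List.mem_cons_of_mem _ hq)
      · have hpw := hI₁.qmono
        simp only [List.map_cons] at hpw
        exact (List.pairwise_cons.mp hpw).2
      · exact fun p hp => hI₁.qok p (List.mem_cons_of_mem _ hp)
      · intro w k0 c0 hw hb0 h0
        obtain ⟨p, hp, hpk, hpadj⟩ := hI₁.reach w k0 c0 hw hb0 h0
        rcases List.mem_cons.mp hp with heq | hp
        · exfalso
          subst heq
          have hwforms := pvAdj_mem (e.1, e.2.1) w (by exact hpadj)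
          rcases hwforms with hwf | hwf | hwf | hwf
          · exact hnb₁ ((-1 : Int), (0 : Int)) (by simp) (hwf ▸ hw) (hwf ▸ h0)
          · exact hnb₁ ((0 : Int), (-1 : Int)) (by simp) (hwf ▸ hw) (hwf ▸ h0)
          · exact hnb₁ ((1 : Int), (0 : Int)) (by simp) (hwf ▸ hw) (hwf ▸ h0)
          · exact hnb₁ ((0 : Int), (1 : Int)) (by simp) (hwf ▸ hw) (hwf ▸ h0)
        · exact ⟨p, hp, hpk, hpadj⟩
    obtain ⟨h', New', hfold, hI', hZ⟩ := ih h₁ New₁ hI₂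
    refine ⟨h', New', ?_, hI', by omega⟩
    rw [hstep1]
    exact hfold

-- a finished round restarts the invariant at distance t+1
lemma pvRoundAdvance (m n : Int) (L : List (Int × Int × Int)) (hL : ∀ e ∈ L, pvOK m n e) (t : Nat)
    (h : List (List Int)) (New : List ((Int × Int × Int) × Nat))
    (hI : pvInv m n L t h New []) : pvInv m n L (t + 1) h [] New := by
  have hcast : ((t + 1 : Nat) : Int) = (t : Int) + 1 := by push_cast; ring
  refine ⟨hI.shape, hI.seedv, ?_, ?_, ?_, ?_, hI.nosrc, ?_, ?_, ?_, ?_, ?_, ?_⟩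
  · intro w k0 d0 c0 hw hsn hb0 hd0
    rw [hcast] at hd0
    by_cases hdt : d0 ≤ (t : Int)
    · exact hI.settled w k0 d0 c0 hw hsn hb0 hdt
    · have hd0' : d0 = (t : Int) + 1 := by omega
      subst hd0'
      by_cases hcl : ∃ p ∈ New, (p.1.1, p.1.2.1) = w
      · exact hI.claimedv w k0 c0 hw hb0 hcl
      · push_neg at hcl
        have h0 := hI.unclaimed w k0 c0 hw hb0 hcl
        obtain ⟨p, hp, -⟩ := hI.reach w k0 c0 hw hb0 h0
        exact absurd hp (List.not_mem_nil)
  · intro w k0 c0 hw hb0 hex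
    obtain ⟨p, hp, -⟩ := hex
    exact absurd hp (List.not_mem_nil)
  · intro w k0 c0 hw hb0 _
    rw [hcast] at hb0
    exact hI.far w k0 ((t : Int) + 1 + 1) c0 hw hb0 (by omega)
  · intro w k0 d0 c0 hw hb0 hgt
    rw [hcast] at hgt
    exact hI.far w k0 d0 c0 hw hb0 (by omega)
  · intro p hp
    exact absurd hp (List.not_mem_nil)
  · simp
  · intro p hp
    exact absurd hp (List.not_mem_nil)
  · exact hI.newmono
  · intro p hp
    obtain ⟨hin, hbp⟩ := hI.newok p hp
    obtain ⟨hkp, ha1, ha2⟩ := pvBest_attain L _ _ _ _ hbp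
    exact ⟨hkp, by rw [hcast]; exact ha1, ha2, hin⟩
  · intro w k0 c0 hw hb0 h0
    rw [hcast] at hb0
    obtain ⟨u, hu1, hu2, hu3⟩ :=
      pvGeomStep m n L hL w hw k0 ((t : Int) + 1 + 1) c0 hb0 (by omega)
    have hu3' : pvBest L u = some (k0, (t : Int) + 1, c0) := by
      have harith : (t : Int) + 1 + 1 - 1 = (t : Int) + 1 := by ring
      rw [harith] at hu3
      exact hu3
    have hune : pvCv h u ≠ 0 := by
      intro hu0
      obtain ⟨p, hp, -⟩ := hI.reach u k0 c0 hu1 hu3' hu0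
      exact absurd hp (List.not_mem_nil)
    have hex : ∃ p ∈ New, (p.1.1, p.1.2.1) = u := by
      by_contra hcl
      push_neg at hcl
      exact hune (hI.unclaimed u k0 c0 hu1 hu3' hcl)
    obtain ⟨p, hp, hpu⟩ := hex
    refine ⟨p, hp, ?_, ?_⟩
    · have hbp := (hI.newok p hp).2
      rw [hpu, hu3'] at hbp
      simp only [Option.some.injEq, Prod.mk.injEq] at hbp
      omega
    · have hpu1 : p.1.1 = u.1 := by
        have := congrArg Prod.fst hpu
        simpa using this
      have hpu2 : p.1.2.1 = u.2 := by
        have := congrArg Prod.snd hpu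
        simpa using this
      rw [hpu1, hpu2]
      exact hu2

-- an exhausted queue means every cell already carries its final value
lemma pvLoopNil (m n : Int) (L : List (Int × Int × Int)) (hL : ∀ e ∈ L, pvOK m n e) (t : Nat)
    (g : List (List Int)) (hI : pvInv m n L t g [] []) :
    pvShape m n g ∧ ∀ v, pvInR m n v → pvCv g v = pvSpecCell L v := by
  have hnone : ∀ w k c, pvInR m n w → ¬ pvBest L w = some (k, ((t + 1 : Nat) : Int), c) := by
    intro w k c hw hb
    have hcast : ((t + 1 : Nat) : Int) = (t : Int) + 1 := by push_cast; ring
    rw [hcast] at hb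
    by_cases h0 : pvCv g w = 0
    · obtain ⟨p, hp, -⟩ := hI.reach w k c hw hb h0
      exact absurd hp (List.not_mem_nil)
    · exact h0 (hI.unclaimed w k c hw hb (fun p hp => absurd hp (List.not_mem_nil)))
  have hlt := pvDescend m n L hL (t + 1) hnone
  refine ⟨hI.shape, ?_⟩
  intro v hv
  unfold pvSpecCell
  cases hsv : pvSeedVal L v with
  | some c =>
    have hval := hI.seedv v hv (by rw [hsv]; simp)
    rw [hsv] at hval
    simpa using hval
  | none =>
    cases hbv : pvBest L v with
    | none => simpa using hI.nosrc v hv hbv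
    | some x =>
      rcases x with ⟨k0, d0, c0⟩
      have hd := hlt v k0 d0 c0 hv hbv
      have hdle : d0 ≤ (t : Int) := by push_cast at hd; omega
      exact hI.settled v k0 d0 c0 hv hsv hbv hdle

-- the main loop: with the invariant and enough fuel, BFS fills the grid to the spec
lemma pvLoop (m n : Int) (L : List (Int × Int × Int)) (hL : ∀ e ∈ L, pvOK m n e) :
    ∀ (k t : Nat) (g : List (List Int)) (Q : List ((Int × Int × Int) × Nat)) (fuel : Nat),
      pvInv m n L t g [] Q →
      m.toNat + n.toNat + 1 ≤ t + k →
      pvZ g + Q.length ≤ fuel →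
      pvShape m n (pvBFS m n fuel g (Q.map Prod.fst)) ∧
      ∀ v, pvInR m n v → pvCv (pvBFS m n fuel g (Q.map Prod.fst)) v = pvSpecCell L v := by
  intro k
  induction k with
  | zero =>
    intro t g Q fuel hI hk hf
    cases Q with
    | nil =>
      simp only [List.map_nil]
      rw [pvBFS_nil]
      exact pvLoopNil m n L hL t g hI
    | cons p Q' =>
      exfalso
      obtain ⟨hkp, hdp, hcp, hinp⟩ := hI.qok p List.mem_cons_self
      have hkp' : p.2 < L.length := hkp
      have hdp2 : pvDE (L[p.2]'hkp') (p.1.1, p.1.2.1) = (t : Int) := hdp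
      have hi1 : 0 ≤ p.1.1 := hinp.1
      have hi2 : p.1.1 < m := hinp.2.1
      have hi3 : 0 ≤ p.1.2.1 := hinp.2.2.1
      have hi4 : p.1.2.1 < n := hinp.2.2.2
      obtain ⟨ho1, ho2, ho3, ho4, ho5⟩ := hL _ (List.getElem_mem hkp')
      have habs : pvDE (L[p.2]'hkp') (p.1.1, p.1.2.1) < m + n := by
        show |(L[p.2]'hkp').1 - p.1.1| + |(L[p.2]'hkp').2.1 - p.1.2.1| < m + n
        rcases pvAbs ((L[p.2]'hkp').1 - p.1.1) with ⟨a1, b1⟩ | ⟨a1, b1⟩ <;>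
          rcases pvAbs ((L[p.2]'hkp').2.1 - p.1.2.1) with ⟨a2, b2⟩ | ⟨a2, b2⟩ <;> omega
      rw [hdp2] at habs
      omega
  | succ k ih =>
    intro t g Q fuel hI hk hf
    cases Q with
    | nil =>
      simp only [List.map_nil]
      rw [pvBFS_nil]
      exact pvLoopNil m n L hL t g hI
    | cons p Q' =>
      obtain ⟨h', New', hfold, hI', hZ⟩ := pvInnerStep m n L hL t (p :: Q') g [] hI
      have hadv := pvRoundAdvance m n L hL t h' New' hI'
      have hPL : pvPL m n g ((p :: Q').map Prod.fst) = (h', New'.map Prod.fst) := by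
        unfold pvPL
        exact hfold
      have hchunk := pvBFS_chunk m n ((p :: Q').map Prod.fst) [] g (fuel - (p :: Q').length)
      rw [List.append_nil] at hchunk
      have hflen : ((p :: Q').map Prod.fst).length + (fuel - (p :: Q').length) = fuel := by
        simp only [List.length_map, List.length_cons]
        simp only [List.length_cons] at hf
        omega
      rw [hflen] at hchunk
      rw [hchunk, hPL]
      simp only [List.nil_append]
      exact ih (t + 1) h' New' (fuel - (p :: Q').length) hadv (by omega)
        (by simp only [List.length_cons, List.length_nil] at hZ hf ⊢; omega)

-- ---------- assembling the two ports ----------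

lemma pvCv_getElem (m n : Int) (g : List (List Int)) (hs : pvShape m n g) (i j : Nat)
    (hi : i < m.toNat) (hj : j < n.toNat) :
    ∃ (h1 : i < g.length) (h2 : j < (g[i]'h1).length),
      pvCv g ((i : Int), (j : Int)) = (g[i]'h1)[j]'h2 := by
  have h1 : i < g.length := by rw [hs.1]; exact hi
  have h2 : j < (g[i]'h1).length := by rw [hs.2 _ (List.getElem_mem h1)]; exact hj
  refine ⟨h1, h2, ?_⟩
  show PySem.List.pyGetD (PySem.List.pyGetD g ((i : Nat) : Int) []) ((j : Nat) : Int) 0 = _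
  rw [PySem.List.pyGetD_eq_getElem g [] (by omega) (by exact_mod_cast h1)]
  simp only [Int.toNat_natCast]
  rw [PySem.List.pyGetD_eq_getElem _ 0 (by omega) (by exact_mod_cast h2)]
  simp only [Int.toNat_natCast]

lemma pvAlt_cell (m n : Int) (sources : List (List Int)) (i j : Nat)
    (hi : i < m.toNat) (hj : j < n.toNat) :
    ∃ (h1 : i < (colorGrid_alt m n sources).length)
      (h2 : j < ((colorGrid_alt m n sources)[i]'h1).length),
      ((colorGrid_alt m n sources)[i]'h1)[j]'h2 =
        pvSpecCell
          ((PySem.List.sorted sources (fun x => -(PySem.List.pyGetD x 2 0)) false).map pvTriple)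
          ((i : Int), (j : Int)) := by
  have hlen1 : (colorGrid_alt m n sources).length = m.toNat := by
    simp [colorGrid_alt, PySem.List.length_pyRange_one]
  have h1 : i < (colorGrid_alt m n sources).length := by rw [hlen1]; exact hi
  have hrowlen : ((colorGrid_alt m n sources)[i]'h1).length = n.toNat := by
    simp [colorGrid_alt, List.getElem_map, PySem.List.length_pyRange_one]
  have h2 : j < ((colorGrid_alt m n sources)[i]'h1).length := by rw [hrowlen]; exact hj
  refine ⟨h1, h2, ?_⟩
  simp only [colorGrid_alt, List.getElem_map, PySem.List.getElem_pyRange_one, zero_add]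
  rw [pvDict_fold, pvNearestB_eq]
  unfold pvSpecCell
  cases hsv : pvSeedVal
      ((PySem.List.sorted sources (fun x => -(PySem.List.pyGetD x 2 0)) false).map pvTriple)
      ((i : Int), (j : Int)) with
  | some c => simp
  | none =>
    cases hbv : pvBest
        ((PySem.List.sorted sources (fun x => -(PySem.List.pyGetD x 2 0)) false).map pvTriple)
        ((i : Int), (j : Int)) with
    | none => simp
    | some x => simp

lemma pvAlt_shape (m n : Int) (sources : List (List Int)) :
    pvShape m n (colorGrid_alt m n sources) := by
  constructor
  · simp [colorGrid_alt, PySem.List.length_pyRange_one]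
  · intro row hrow
    simp only [colorGrid_alt, List.mem_map] at hrow
    obtain ⟨a, ha, hrow⟩ := hrow
    rw [← hrow]
    simp [PySem.List.length_pyRange_one]

theorem pvMain (m : Int) (n : Int) (sources : List (List Int))
    (hPre : Pre_colorGrid m n sources) : colorGrid m n sources = colorGrid_alt m n sources := by
  have hsrc : ∀ s ∈ PySem.List.sorted sources (fun x => -(PySem.List.pyGetD x 2 0)) false,
      pvOK m n (pvTriple s) := by
    intro s hs
    have h := hPre s ((PySem.List.mem_sorted sources _ false s).mp hs)
    exact ⟨h.2.1, h.2.2.1, h.2.2.2.1, h.2.2.2.2.1, h.2.2.2.2.2⟩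
  set ss := PySem.List.sorted sources (fun x => -(PySem.List.pyGetD x 2 0)) false with hssdef
  set L := ss.map pvTriple with hLdef
  have hLok : ∀ e ∈ L, pvOK m n e := by
    intro e he
    rw [hLdef] at he
    obtain ⟨s, hs, rfl⟩ := List.mem_map.mp he
    exact hsrc s hs
  have hA : colorGrid m n sources =
      pvBFS m n (sources.length + m.toNat * n.toNat)
        ((ss.foldl pvSeedStep
          ((PySem.List.pyRange 0 m 1).map (fun _ => PySem.List.pyRepeat [(0 : Int)] n), [])).1)
        ((ss.foldl pvSeedStep
          ((PySem.List.pyRange 0 m 1).map (fun _ => PySem.List.pyRepeat [(0 : Int)] n), [])).2) :=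
    rfl
  rw [pvAns0_eq m n] at hA
  have hshape0 := pvShape_replicate m n
  have hG0shape := pvSeed_shape m n ss (List.replicate m.toNat (List.replicate n.toNat 0)) []
    hsrc hshape0
  have hG0cv : ∀ v, pvInR m n v →
      pvCv ((ss.foldl pvSeedStep (List.replicate m.toNat (List.replicate n.toNat 0), [])).1) v =
        match pvSeedVal L v with
        | some c => c
        | none => pvCv (List.replicate m.toNat (List.replicate n.toNat 0)) v :=
    fun v hv => pvSeed_cv m n ss _ hshape0 v hv hsrc
  set G0 := (ss.foldl pvSeedStep (List.replicate m.toNat (List.replicate n.toNat 0), [])).1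
    with hG0def
  have hQ2 : (ss.foldl pvSeedStep (List.replicate m.toNat (List.replicate n.toNat 0), [])).2
      = L := by
    rw [pvSeed_acc ss (List.replicate m.toNat (List.replicate n.toNat 0)) []]
    rw [hLdef]
    simp
  have hI0 : pvInv m n L 0 G0 [] (pvAnn L 0) := by
    refine ⟨?_, ?_, ?_, ?_, ?_, ?_, ?_, ?_, ?_, ?_, ?_, ?_, ?_⟩
    · exact hG0shape
    · intro v hv hne
      rw [hG0cv v hv]
      cases hsv : pvSeedVal L v with
      | none => exact absurd hsv hne
      | some c => simp [hsv]
    · intro w k0 d0 c0 hw hsn hb0 hd0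
      exfalso
      have hnn := pvBest_nonneg L w k0 d0 c0 hb0
      have hd00 : d0 = 0 := by push_cast at hd0; omega
      subst hd00
      obtain ⟨hk0, ha1, ha2⟩ := pvBest_attain L w k0 0 c0 hb0
      have hat := (pvDE_zero_iff _ _).mp ha1
      rw [pvSeedVal_none_iff] at hsn
      exact hsn (L[k0]'hk0) (List.getElem_mem hk0) hat
    · intro w k0 c0 hw hb0 hex
      obtain ⟨p, hp, -⟩ := hex
      exact absurd hp (List.not_mem_nil)
    · intro w k0 c0 hw hb0 hall
      rw [hG0cv w hw]
      cases hsv : pvSeedVal L w with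
      | some c =>
        exfalso
        have hnn : ¬ pvSeedVal L w = none := by rw [hsv]; simp
        rw [pvSeedVal_none_iff] at hnn
        push_neg at hnn
        obtain ⟨ee, hee, he1, he2⟩ := hnn
        have hlb := pvBest_lb L w k0 _ c0 hb0 ee hee
        have hz := (pvDE_zero_iff ee w).mpr ⟨he1, he2⟩
        push_cast at hlb
        omega
      | none => exact pvCv_replicate m n w hw
    · intro w k0 d0 c0 hw hb0 hgt
      rw [hG0cv w hw]
      cases hsv : pvSeedVal L w with
      | some c =>
        exfalso
        have hnn : ¬ pvSeedVal L w = none := by rw [hsv]; simp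
        rw [pvSeedVal_none_iff] at hnn
        push_neg at hnn
        obtain ⟨ee, hee, he1, he2⟩ := hnn
        have hlb := pvBest_lb L w k0 _ c0 hb0 ee hee
        have hz := (pvDE_zero_iff ee w).mpr ⟨he1, he2⟩
        push_cast at hgt
        omega
      | none => exact pvCv_replicate m n w hw
    · intro w hw hb0
      rw [hG0cv w hw]
      have hL0 : L = [] := (pvBest_eq_none_iff L w).mp hb0
      rw [hL0]
      have : pvSeedVal ([] : List (Int × Int × Int)) w = none := rfl
      rw [this]
      exact pvCv_replicate m n w hw
    · intro p hp
      exact absurd hp (List.not_mem_nil)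
    · simp
    · intro p hp
      exact absurd hp (List.not_mem_nil)
    · exact pvAnn_snd_mono L 0
    · intro p hp
      rcases p with ⟨pe, pk⟩
      obtain ⟨jj, hjj, hpe⟩ := (pvAnn_mem L 0 (pe, pk)).mp hp
      simp only [Prod.mk.injEq] at hpe
      obtain ⟨hpe1, hpe2⟩ := hpe
      subst hpe1
      have hpk : jj = pk := by omega
      subst hpk
      refine ⟨hjj, ?_, rfl, ?_⟩
      · have hz := (pvDE_zero_iff (L[jj]'hjj)
          (((L[jj]'hjj), jj).1.1, ((L[jj]'hjj), jj).1.2.1)).mpr ⟨rfl, rfl⟩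
        rw [hz]
        simp
      · have hok := hLok (L[jj]'hjj) (List.getElem_mem hjj)
        exact ⟨hok.1, hok.2.1, hok.2.2.1, hok.2.2.2.1⟩
    · intro w k0 c0 hw hb0 h0
      have hone : ((0 : Nat) : Int) + 1 = 1 := by norm_num
      rw [hone] at hb0
      obtain ⟨u, hu1, hu2, hu3⟩ := pvGeomStep m n L hLok w hw k0 1 c0 hb0 (by norm_num)
      have honez : (1 : Int) - 1 = 0 := by norm_num
      rw [honez] at hu3
      obtain ⟨hk0, ha1, ha2⟩ := pvBest_attain L u k0 0 c0 hu3
      have hat := (pvDE_zero_iff _ _).mp ha1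
      refine ⟨((L[k0]'hk0), k0), ?_, rfl, ?_⟩
      · rw [pvAnn_mem]
        exact ⟨k0, hk0, by simp⟩
      · show |(L[k0]'hk0).1 - w.1| + |(L[k0]'hk0).2.1 - w.2| = 1
        rw [hat.1, hat.2]
        exact hu2
  have hQlen : (pvAnn L 0).length = sources.length := by
    have hl1 : (pvAnn L 0).length = L.length := by
      have := congrArg List.length (pvAnn_map_fst L 0)
      simpa using this
    rw [hl1, hLdef, hssdef]
    simp [PySem.List.length_sorted]
  have hZ0 : pvZ G0 ≤ m.toNat * n.toNat := pvZ_le m n G0 hG0shape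
  have hloop := pvLoop m n L hLok (m.toNat + n.toNat + 1) 0 G0 (pvAnn L 0)
    (sources.length + m.toNat * n.toNat) hI0 (by omega) (by omega)
  rw [pvAnn_map_fst] at hloop
  rw [hQ2] at hA
  obtain ⟨hshapeA, hvalA⟩ := hloop
  rw [← hA] at hshapeA hvalA
  apply List.ext_getElem
  · rw [hshapeA.1, (pvAlt_shape m n sources).1]
  · intro i h1 h2
    apply List.ext_getElem
    · rw [hshapeA.2 _ (List.getElem_mem h1), (pvAlt_shape m n sources).2 _ (List.getElem_mem h2)]
    · intro j hj1 hj2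
      have hiM : i < m.toNat := by rw [← hshapeA.1]; exact h1
      have hjN : j < n.toNat := by
        have hr := hshapeA.2 _ (List.getElem_mem h1)
        rw [hr] at hj1
        exact hj1
      have hvin : pvInR m n ((i : Int), (j : Int)) :=
        ⟨by omega, by omega, by omega, by omega⟩
      obtain ⟨ha1, ha2, hcv⟩ := pvCv_getElem m n (colorGrid m n sources) hshapeA i j hiM hjN
      have hval := hvalA ((i : Int), (j : Int)) hvin
      obtain ⟨hb1, hb2, hbeq⟩ := pvAlt_cell m n sources i j hiM hjN
      exact hcv.symm.trans (hval.trans hbeq.symm)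

-- ===== VERDICT (by name: the statement is the Claim_ definition above) =====
theorem colorGrid_spec : Claim_equal_colorGrid := by
  intro m n sources _ hPre
  unfold Spec_colorGrid
  exact pvMain m n sources hPre
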